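-- pv_equiv track=rewrite | github.com/neilKhanh/BaiTap_Python | Python/test.py | replace_in_pos
-- ===== SOURCE A (Python) =====
-- def replace_in_pos(x, sub, resub, pos):
--     pos_sub = -1
--     for h in range(len(x)):
--         t = h + len(sub)
--         if x[h: t] == sub:
--             pos_sub += 1
--             if pos_sub == pos:
--                 x = x[:h] + resub + x[t:]
--                 return x
-- ===== SOURCE B (Python) =====
-- def replace_in_pos(x, sub, resub, pos):
--     # index every character's positions once
--     where = {}
--     for i, ch in enumerate(x):
--         where.setdefault(ch, set()).add(i)
--     # candidate start positions: intersect with each character's (shifted) position set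
--     occ = set(range(len(x) - len(sub) + 1))
--     for j, ch in enumerate(sub):
--         s = where.get(ch, set())
--         occ = {i for i in occ if i + j in s}
--     matches = sorted(occ)
--     if 0 <= pos < len(matches):
--         i = matches[pos]
--         return x[:i] + resub + x[i + len(sub):]
--     return None
-- ===== Notes on version B (the rewrite author's own statement) =====
-- stated objective: alternative
-- what changed: B abandons A's counting scan (compare a fresh slice at every index, stop at the pos-th hit) for a set-algebra algorithm: it builds a char->positions dict in one pass, computes ALL occurrence starts at once by filtering the candidate set against each character's position set (start i survives iff i+j is a position of sub[j] for every j), then sorts the result and indexes it directly with a bounds check.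
-- intended difference: On inputs with sub == '' and pos == len(x), A returns None (its scan stops at index len(x)-1) while B returns x + resub; CPython's own find/replace treat the empty substring as also occurring at the very end of the string, so B's value is the intended one. — e.g. on replace_in_pos("a", "", "X", 1): A returns none, B returns some "aX"
import Mathlib
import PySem

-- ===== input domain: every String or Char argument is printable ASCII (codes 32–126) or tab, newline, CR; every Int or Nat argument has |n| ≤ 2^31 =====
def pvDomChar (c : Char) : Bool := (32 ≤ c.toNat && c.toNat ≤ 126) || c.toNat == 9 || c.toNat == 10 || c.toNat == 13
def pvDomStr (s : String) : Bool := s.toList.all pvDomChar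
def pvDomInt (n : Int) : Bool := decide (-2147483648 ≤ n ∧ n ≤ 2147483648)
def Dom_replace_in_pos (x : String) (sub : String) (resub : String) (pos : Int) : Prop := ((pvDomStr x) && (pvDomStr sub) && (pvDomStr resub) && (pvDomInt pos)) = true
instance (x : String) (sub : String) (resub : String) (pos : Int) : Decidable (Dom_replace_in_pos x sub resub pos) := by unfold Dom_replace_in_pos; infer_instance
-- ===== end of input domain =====

-- B replaces A's counting scan (slice-compare at every index, stop at the pos-th hit) by a
-- set-algebra algorithm: index every character's positions once in a dict, intersect the
-- shifted position sets to get ALL occurrence starts, sort them and index directly; on the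
-- corner sub = "" with pos = len(x), A returns None while B returns x + resub (D_ below).

-- ===== PORT A =====
-- literal port of A: for h in range(len(x)): if x[h:h+len(sub)]==sub: pos_sub += 1; if pos_sub==pos: return x[:h]+resub+x[h+len(sub):]
-- (the for-loop over range(len(x)) is the structural countdown r = len(x)-h)
def repA_go (xs sub resub : List Char) (pos : Int) : Nat → Nat → Int → Option String
  | 0, _, _ => none
  | r+1, h, posSub =>
    if PySem.List.slice xs (some (h : Int)) (some ((h + sub.length : Nat) : Int)) = sub then
      if posSub + 1 = pos then
        some (String.ofList (PySem.List.slice xs none (some (h : Int)) ++ resub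
          ++ PySem.List.slice xs (some ((h + sub.length : Nat) : Int)) none))
      else repA_go xs sub resub pos r (h+1) (posSub+1)
    else repA_go xs sub resub pos r (h+1) posSub

def replace_in_pos (x : String) (sub : String) (resub : String) (pos : Int) : Option String :=
  repA_go x.toList sub.toList resub.toList pos x.toList.length 0 (-1)

-- ===== PORT B =====
-- literal port of Source B: where = {}; for i, ch in enumerate(x): where.setdefault(ch, set()).add(i)
def bIndex (xs : List Char) : PySem.Dict Char (PySem.Set Int) :=
  (PySem.List.enumerate xs).foldl
    (fun d p => d.modify p.2 PySem.Set.empty (fun s => PySem.Set.add s p.1)) PySem.Dict.empty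

-- occ = set(range(len(x)-len(sub)+1)); for j, ch in enumerate(sub): s = where.get(ch, set()); occ = {i for i in occ if i + j in s}
def bOcc (xs sub : List Char) : PySem.Set Int :=
  (PySem.List.enumerate sub).foldl
    (fun occ p => occ.filter
      (fun i => PySem.Set.contains ((bIndex xs).getD p.2 PySem.Set.empty) (i + p.1)))
    (PySem.Set.ofList (PySem.List.pyRange 0 ((xs.length : Int) - (sub.length : Int) + 1)))

-- matches = sorted(occ); if 0 <= pos < len(matches): i = matches[pos]; return x[:i]+resub+x[i+len(sub):]
def replace_in_pos_alt (x : String) (sub : String) (resub : String) (pos : Int) : Option String :=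
  let xs := x.toList
  let ms := PySem.List.sorted (bOcc xs sub.toList) (fun v => v)
  if 0 ≤ pos ∧ pos < (ms.length : Int) then
    let i := PySem.List.pyGetD ms pos 0
    some (String.ofList (PySem.List.slice xs none (some i) ++ resub.toList
      ++ PySem.List.slice xs (some (i + (sub.toList.length : Int))) none))
  else none

-- ===== PRECONDITION & SPEC =====
-- On inputs with sub = "" and pos = len(x), A returns None (its scan stops at index len(x)-1)
-- while B returns x + resub — CPython's own find/replace count the empty substring as also
-- occurring at the very end of the string, so B's value is the intended one.
def D_replace_in_pos (x : String) (sub : String) (resub : String) (pos : Int) : Prop :=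
  sub = "" ∧ pos = (x.toList.length : Int)
instance (x : String) (sub : String) (resub : String) (pos : Int) : Decidable (D_replace_in_pos x sub resub pos) := by unfold D_replace_in_pos; infer_instance

def Spec_replace_in_pos (x : String) (sub : String) (resub : String) (pos : Int) (out : Option String) : Prop := ¬ D_replace_in_pos x sub resub pos → out = replace_in_pos_alt x sub resub pos
instance (x : String) (sub : String) (resub : String) (pos : Int) (out : Option String) : Decidable (Spec_replace_in_pos x sub resub pos out) := by unfold Spec_replace_in_pos; infer_instance

def pvDiffWitness_replace_in_pos : String × String × String × Int := ("a", "", "X", 1)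
def pvDiffWitnessOut_replace_in_pos : (Option String) × (Option String) := (none, some "aX")

-- ===== CLAIM (what is proved, stated in full; the proofs are below) =====
def Claim_unchanged_replace_in_pos : Prop := ∀ (x : String) (sub : String) (resub : String) (pos : Int), Dom_replace_in_pos x sub resub pos → Spec_replace_in_pos x sub resub pos (replace_in_pos x sub resub pos)
def Claim_changed_replace_in_pos : Prop := Dom_replace_in_pos (pvDiffWitness_replace_in_pos.1) (pvDiffWitness_replace_in_pos.2.1) (pvDiffWitness_replace_in_pos.2.2.1) (pvDiffWitness_replace_in_pos.2.2.2) ∧ D_replace_in_pos (pvDiffWitness_replace_in_pos.1) (pvDiffWitness_replace_in_pos.2.1) (pvDiffWitness_replace_in_pos.2.2.1) (pvDiffWitness_replace_in_pos.2.2.2) ∧ replace_in_pos (pvDiffWitness_replace_in_pos.1) (pvDiffWitness_replace_in_pos.2.1) (pvDiffWitness_replace_in_pos.2.2.1) (pvDiffWitness_replace_in_pos.2.2.2) = pvDiffWitnessOut_replace_in_pos.1 ∧ replace_in_pos_alt (pvDiffWitness_replace_in_pos.1) (pvDiffWitness_replace_in_pos.2.1) (pvDiffWitness_replace_in_pos.2.2.1)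 (pvDiffWitness_replace_in_pos.2.2.2) = pvDiffWitnessOut_replace_in_pos.2 ∧ pvDiffWitnessOut_replace_in_pos.1 ≠ pvDiffWitnessOut_replace_in_pos.2
def Claim_exact_replace_in_pos : Prop := ∀ (x : String) (sub : String) (resub : String) (pos : Int), Dom_replace_in_pos x sub resub pos → D_replace_in_pos x sub resub pos → replace_in_pos x sub resub pos ≠ replace_in_pos_alt x sub resub pos

-- ===== LEMMAS AND PROOFS =====

-- the string produced when the chosen occurrence is at index h
def pvRepl (xs sub resub : List Char) (h : Nat) : String :=
  String.ofList (xs.take h ++ resub ++ xs.drop (h + sub.length))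

-- Python-style indexing of the occurrence list by an Int
def pvPick (l : List Nat) (n : Int) : Option Nat := if 0 ≤ n then l[n.toNat]? else none

def pvP (xs sub : List Char) : Nat → Bool := fun j => decide (sub <+: xs.drop j)

lemma pvPick_cons (a : Nat) (l : List Nat) (n : Int) :
    pvPick (a :: l) n = if n = 0 then some a else pvPick l (n - 1) := by
  unfold pvPick
  by_cases hpos : 0 ≤ n
  · by_cases h0 : n = 0
    · simp [h0]
    · have h1 : 0 ≤ n - 1 := by omega
      have h2 : n.toNat = (n - 1).toNat + 1 := by omega
      rw [if_pos hpos, if_neg h0, if_pos h1, h2, List.getElem?_cons_succ]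
  · have h0 : ¬ n = 0 := by omega
    have h1 : ¬ 0 ≤ n - 1 := by omega
    rw [if_neg hpos, if_neg h0, if_neg h1]

-- A's slice test at h is the prefix test on the h-th tail
lemma pvTest_iff (xs sub : List Char) (h : Nat) :
    (PySem.List.slice xs (some (h : Int)) (some ((h + sub.length : Nat) : Int)) = sub)
      ↔ sub <+: xs.drop h := by
  have hc : ((h + sub.length : Nat) : Int) = (h : Int) + (sub.length : Int) := by push_cast; ring
  rw [hc, PySem.List.slice_natCast_add]
  constructor
  · intro he; rw [List.prefix_iff_eq_take]; exact he.symm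
  · intro hp; exact (List.prefix_iff_eq_take.mp hp).symm

-- characterisation of A's scan from state (h, c) with r iterations left
lemma repA_eq (xs sub resub : List Char) (pos : Int) :
    ∀ r h c, repA_go xs sub resub pos r h c =
      (pvPick ((List.range' h r).filter (pvP xs sub)) (pos - c - 1)).map (pvRepl xs sub resub) := by
  intro r
  induction r with
  | zero => intro h c; simp [repA_go, pvPick]
  | succ n ih =>
    intro h c
    rw [List.range'_succ, List.filter_cons]
    by_cases hp : sub <+: xs.drop h
    · have hpb : pvP xs sub h = true := by simp [pvP, hp]
      rw [hpb, if_pos rfl, pvPick_cons]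
      simp only [repA_go]
      rw [if_pos ((pvTest_iff xs sub h).mpr hp)]
      by_cases heq : c + 1 = pos
      · rw [if_pos heq, if_pos (by omega : pos - c - 1 = 0)]
        rw [PySem.List.slice_to_natCast, PySem.List.slice_from_natCast]
        simp [pvRepl]
      · rw [if_neg heq, if_neg (by omega : ¬ pos - c - 1 = 0), ih (h+1) (c+1)]
        have : pos - c - 1 - 1 = pos - (c+1) - 1 := by ring
        rw [this]
    · have hpb : pvP xs sub h = false := by simp [pvP, hp]
      rw [hpb]
      simp only [Bool.false_eq_true, if_false]
      simp only [repA_go]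
      rw [if_neg (fun he => hp ((pvTest_iff xs sub h).mp he)), ih (h+1) c]

-- prefix at h, pointwise: sub matches xs at offset h iff it fits and every character agrees
lemma pvPrefix_iff (xs sub : List Char) (h : Nat) (hh : h ≤ xs.length) :
    sub <+: xs.drop h ↔ h + sub.length ≤ xs.length ∧
      ∀ k, k < sub.length → xs[h+k]? = sub[k]? := by
  constructor
  · intro hp
    have hlen : sub.length ≤ xs.length - h := by
      have := hp.length_le; simpa [List.length_drop] using this
    refine ⟨by omega, ?_⟩
    intro k hk
    have hk2 : h + k < xs.length := by omega
    have he : sub[k] = (xs.drop h)[k]'(by simp [List.length_drop]; omega) := hp.getElem hk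
    rw [List.getElem_drop] at he
    rw [List.getElem?_eq_getElem hk2, List.getElem?_eq_getElem hk, he]
  · rintro ⟨hlen, hpt⟩
    rw [List.prefix_iff_eq_take]
    apply List.ext_getElem
    · simp [List.length_take, List.length_drop]; omega
    · intro k hk1 hk2
      have hk : k < sub.length := hk1
      have hkx : h + k < xs.length := by omega
      have := hpt k hk
      rw [List.getElem?_eq_getElem hkx, List.getElem?_eq_getElem hk] at this
      simp only [List.getElem_take, List.getElem_drop]
      exact (Option.some_inj.mp this).symm

-- the character-position dict, unrolled: v is recorded under c iff (v, c) was inserted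
lemma pvIndex_getD_fold (l : List (Int × Char)) (d : PySem.Dict Char (PySem.Set Int))
    (c : Char) (v : Int) :
    v ∈ (l.foldl (fun d p => d.modify p.2 PySem.Set.empty (fun s => PySem.Set.add s p.1)) d).getD c PySem.Set.empty
    ↔ v ∈ d.getD c PySem.Set.empty ∨ (v, c) ∈ l := by
  induction l generalizing d with
  | nil => simp
  | cons p l ih =>
    rw [List.foldl_cons, ih]
    rw [PySem.Dict.getD_modify]
    by_cases hc : c = p.2
    · subst hc
      rw [if_pos rfl, PySem.Set.mem_add]
      constructor
      · rintro (⟨hv | hv⟩ | hv)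
        · exact Or.inl hv
        · refine Or.inr (List.mem_cons.mpr (Or.inl ?_))
          exact Prod.ext (by simpa using hv) rfl
        · exact Or.inr (List.mem_cons_of_mem _ hv)
      · rintro (hv | hv)
        · exact Or.inl (Or.inl hv)
        · rcases List.mem_cons.mp hv with he | hm
          · exact Or.inl (Or.inr (congrArg Prod.fst he))
          · exact Or.inr hm
    · rw [if_neg hc]
      constructor
      · rintro (hv | hv)
        · exact Or.inl hv
        · exact Or.inr (List.mem_cons_of_mem _ hv)
      · rintro (hv | hv)
        · exact Or.inl hv
        · rcases List.mem_cons.mp hv with he | hm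
          · exact absurd (congrArg Prod.snd he) hc
          · exact Or.inr hm

-- v ∈ where[c] iff v is a position of c in xs
lemma mem_bIndex (xs : List Char) (c : Char) (v : Int) :
    v ∈ (bIndex xs).getD c PySem.Set.empty
    ↔ ∃ k : Nat, ∃ _ : k < xs.length, xs[k] = c ∧ v = (k : Int) := by
  rw [bIndex, pvIndex_getD_fold]
  constructor
  · rintro (hv | hv)
    · simp [PySem.Dict.getD_empty, PySem.Set.empty] at hv
    · rw [PySem.List.mem_enumerate_iff] at hv
      obtain ⟨k, hk, he⟩ := hv
      exact ⟨k, hk, (congrArg Prod.snd he).symm, by simpa using congrArg Prod.fst he⟩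
  · rintro ⟨k, hk, hc, hv⟩
    refine Or.inr ?_
    rw [PySem.List.mem_enumerate_iff]
    exact ⟨k, hk, by simp [hv, hc]⟩

lemma pv_mem_foldl_filter {β : Type} (l : List β) (f : β → Int → Bool) (s : PySem.Set Int) (v : Int) :
    v ∈ l.foldl (fun occ p => occ.filter (f p)) s ↔ v ∈ s ∧ ∀ p ∈ l, f p v = true := by
  induction l generalizing s with
  | nil => simp
  | cons p l ih =>
    rw [List.foldl_cons, ih, List.mem_filter]
    constructor
    · rintro ⟨⟨hs, hf⟩, hall⟩
      refine ⟨hs, fun q hq => ?_⟩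
      rcases List.mem_cons.mp hq with he | hm
      · exact he ▸ hf
      · exact hall q hm
    · rintro ⟨hs, hall⟩
      exact ⟨⟨hs, hall p List.mem_cons_self⟩, fun q hq => hall q (List.mem_cons_of_mem _ hq)⟩

lemma pv_nodup_foldl_filter {β : Type} (l : List β) (f : β → Int → Bool) (s : PySem.Set Int)
    (hs : s.Nodup) : (l.foldl (fun occ p => occ.filter (f p)) s).Nodup := by
  induction l generalizing s with
  | nil => exact hs
  | cons p l ih => exact ih _ (List.Nodup.filter _ hs)

-- B's intersection set holds exactly the casts of the occurrence positions
lemma mem_bOcc (xs sub : List Char) (v : Int) :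
    v ∈ bOcc xs sub ↔ ∃ h : Nat, h ≤ xs.length ∧ sub <+: xs.drop h ∧ v = (h : Int) := by
  rw [bOcc, pv_mem_foldl_filter, PySem.Set.mem_ofList, PySem.List.mem_pyRange_one]
  constructor
  · rintro ⟨⟨h0, h1⟩, hall⟩
    refine ⟨v.toNat, by omega, ?_, by omega⟩
    rw [pvPrefix_iff xs sub v.toNat (by omega)]
    refine ⟨by omega, ?_⟩
    intro k hk
    have := hall ((k : Int), sub[k]) (by
      rw [PySem.List.mem_enumerate_iff]
      exact ⟨k, hk, by simp⟩)
    rw [PySem.Set.contains_iff, mem_bIndex] at this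
    obtain ⟨k', hk', hck', hik'⟩ := this
    have hk'eq : k' = v.toNat + k := by omega
    rw [List.getElem?_eq_getElem (by omega : v.toNat + k < xs.length),
      List.getElem?_eq_getElem hk]
    subst hk'eq
    exact congrArg some hck'
  · rintro ⟨h, hh, hp, hv⟩
    rw [pvPrefix_iff xs sub h hh] at hp
    obtain ⟨hlen, hpt⟩ := hp
    refine ⟨by omega, ?_⟩
    intro p hp'
    rw [PySem.List.mem_enumerate_iff] at hp'
    obtain ⟨k, hk, hpe⟩ := hp'
    subst hpe
    rw [PySem.Set.contains_iff, mem_bIndex]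
    refine ⟨h + k, by omega, ?_, by push_cast; omega⟩
    have := hpt k hk
    rw [List.getElem?_eq_getElem (by omega : h + k < xs.length),
      List.getElem?_eq_getElem hk] at this
    exact Option.some_inj.mp this

lemma nodup_bOcc (xs sub : List Char) : (bOcc xs sub).Nodup := by
  rw [bOcc]
  exact pv_nodup_foldl_filter _ _ _ (PySem.Set.nodup_ofList _)

-- sorting B's set names it: the increasing list of occurrence positions
lemma pv_matches_eq (xs sub : List Char) :
    PySem.List.sorted (bOcc xs sub) (fun v => v)
      = List.map (fun h : Nat => (h : Int))
          ((List.range' 0 (xs.length+1)).filter (pvP xs sub)) := by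
  apply PySem.List.sorted_eq_of_perm_of_pairwise_lt
  · rw [List.perm_ext_iff_of_nodup]
    · intro v
      simp only [List.mem_map, List.mem_filter, List.mem_range'_1, mem_bOcc, pvP,
        decide_eq_true_eq]
      constructor
      · rintro ⟨h, ⟨⟨_, hlt⟩, hp⟩, hv⟩
        exact ⟨h, by omega, hp, hv.symm⟩
      · rintro ⟨h, hh, hp, hv⟩
        exact ⟨h, ⟨⟨by omega, by omega⟩, hp⟩, hv.symm⟩
    · exact List.Nodup.map (fun a b hab => by exact_mod_cast hab)
        (List.Nodup.filter _ (List.nodup_range'))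
    · exact nodup_bOcc xs sub
  · rw [List.pairwise_map]
    exact List.Pairwise.filter _ (by
      have h1 : (List.range' 0 (xs.length+1)).Pairwise (· < ·) := List.pairwise_lt_range' 1
      exact h1.imp (fun h => by exact_mod_cast h))

-- B's port, rewritten through the sorted occurrence list
lemma portB_as_pick (x sub resub : String) (pos : Int) :
    replace_in_pos_alt x sub resub pos
      = (pvPick ((List.range' 0 (x.toList.length + 1)).filter (pvP x.toList sub.toList)) pos).map
          (pvRepl x.toList sub.toList resub.toList) := by
  rw [replace_in_pos_alt]
  simp only [pv_matches_eq]
  set T := (List.range' 0 (x.toList.length + 1)).filter (pvP x.toList sub.toList) with hT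
  rw [List.length_map]
  by_cases h0 : 0 ≤ pos
  · by_cases hlt : pos < (T.length : Int)
    · rw [if_pos ⟨h0, hlt⟩]
      have hb : pos.toNat < T.length := by omega
      have hget : PySem.List.pyGetD (List.map (fun h : Nat => (h : Int)) T) pos 0
          = ((T[pos.toNat] : Nat) : Int) := by
        rw [PySem.List.pyGetD_eq_getElem _ _ h0 (by rw [List.length_map]; exact_mod_cast hlt)]
        simp
      rw [hget]
      have hsl1 : PySem.List.slice x.toList none (some ((T[pos.toNat] : Nat) : Int))
          = x.toList.take T[pos.toNat] := PySem.List.slice_to_natCast _ _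
      have hc : ((T[pos.toNat] : Nat) : Int) + (sub.toList.length : Int)
          = ((T[pos.toNat] + sub.toList.length : Nat) : Int) := by push_cast; ring
      rw [hsl1, hc, PySem.List.slice_from_natCast]
      unfold pvPick
      rw [if_pos h0, List.getElem?_eq_getElem hb, Option.map_some]
      rfl
    · rw [if_neg (by omega : ¬ (0 ≤ pos ∧ pos < (T.length : Int)))]
      unfold pvPick
      rw [if_pos h0, List.getElem?_eq_none (by omega), Option.map_none]
  · rw [if_neg (by omega : ¬ (0 ≤ pos ∧ pos < (T.length : Int)))]
    unfold pvPick
    rw [if_neg h0, Option.map_none]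

-- outside D_, the occurrence list of A (positions < len) and of B (positions ≤ len) pick the same
lemma pick_filter_eq (xs sub : List Char) (pos : Int)
    (hD : ¬ (sub = [] ∧ pos = (xs.length : Int))) :
    pvPick ((List.range' 0 xs.length).filter (pvP xs sub)) pos
    = pvPick ((List.range' 0 (xs.length + 1)).filter (pvP xs sub)) pos := by
  by_cases hsub : sub = []
  · have hall : ∀ n, (List.range' 0 n).filter (pvP xs sub) = List.range' 0 n := by
      intro n
      rw [List.filter_eq_self]
      intro a _
      simp [pvP, hsub]
    rw [hall, hall]
    have hpos : pos ≠ (xs.length : Int) := fun h => hD ⟨hsub, h⟩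
    unfold pvPick
    by_cases h0 : 0 ≤ pos
    · rw [if_pos h0, if_pos h0, ← List.range_eq_range', ← List.range_eq_range']
      have hne : pos.toNat ≠ xs.length := by omega
      by_cases hlt : pos.toNat < xs.length
      · rw [List.getElem?_range hlt, List.getElem?_range (by omega)]
      · have h1 : (List.range xs.length)[pos.toNat]? = none :=
          List.getElem?_eq_none (by simp; omega)
        have h2 : (List.range (xs.length + 1))[pos.toNat]? = none :=
          List.getElem?_eq_none (by simp; omega)
        rw [h1, h2]
    · rw [if_neg h0, if_neg h0]
  · have hlast : pvP xs sub xs.length = false := by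
      simp only [pvP, List.drop_length, decide_eq_false_iff_not]
      intro hp
      exact hsub (List.prefix_nil.mp hp)
    rw [List.range'_concat]
    simp only [Nat.one_mul, Nat.zero_add]
    rw [List.filter_append, List.filter_cons, hlast]
    simp

lemma toList_nil_iff (s : String) : s.toList = [] ↔ s = "" := by
  constructor
  · intro h
    have h2 := congrArg String.ofList h
    simpa using h2
  · intro h; simp [h]

-- the two ports, rewritten through their characterisations
lemma ports_as_picks (x sub resub : String) (pos : Int) :
    replace_in_pos x sub resub pos
      = (pvPick ((List.range' 0 x.toList.length).filter (pvP x.toList sub.toList)) pos).map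
          (pvRepl x.toList sub.toList resub.toList)
    ∧ replace_in_pos_alt x sub resub pos
      = (pvPick ((List.range' 0 (x.toList.length + 1)).filter (pvP x.toList sub.toList)) pos).map
          (pvRepl x.toList sub.toList resub.toList) := by
  constructor
  · rw [replace_in_pos, repA_eq]
    have : pos - (-1) - 1 = pos := by ring
    rw [this]
  · exact portB_as_pick x sub resub pos

-- ===== VERDICT (by name: the statement is the Claim_ definition above) =====
theorem replace_in_pos_spec : Claim_unchanged_replace_in_pos := by
  intro x sub resub pos _ hD
  obtain ⟨hA, hB⟩ := ports_as_picks x sub resub pos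
  rw [hA, hB]
  congr 1
  apply pick_filter_eq
  intro ⟨h1, h2⟩
  exact hD ⟨(toList_nil_iff sub).mp h1, h2⟩

theorem replace_in_pos_changed : Claim_changed_replace_in_pos := by
  unfold Claim_changed_replace_in_pos; decide

theorem replace_in_pos_tight : Claim_exact_replace_in_pos := by
  intro x sub resub pos _ hD
  obtain ⟨h1, h2⟩ := hD
  obtain ⟨hA, hB⟩ := ports_as_picks x sub resub pos
  rw [hA, hB]
  have hsub : sub.toList = [] := by simp [h1]
  have hall : ∀ n, (List.range' 0 n).filter (pvP x.toList sub.toList) = List.range' 0 n := by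
    intro n
    rw [List.filter_eq_self]
    intro a _
    simp [pvP, hsub]
  rw [hall, hall, ← List.range_eq_range', ← List.range_eq_range']
  unfold pvPick
  rw [if_pos (by omega : (0:Int) ≤ pos), if_pos (by omega : (0:Int) ≤ pos)]
  have ht : pos.toNat = x.toList.length := by omega
  rw [ht]
  have h1 : (List.range x.toList.length)[x.toList.length]? = none :=
    List.getElem?_eq_none (by simp)
  rw [h1, List.getElem?_range (by omega)]
  simp
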